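-- pv_equiv track=rewrite | github.com/CLAIRE-Labo/open-instruct | open_instruct/older_files/finetune_pref_loop.py | organize_messages
-- ===== SOURCE A (Python) =====
-- def organize_messages(msgs):
--     """Organize messages by splitting and grouping based on roles - Assistant vs Human."""
--     organized_msgs = []
--     current_group = []
--
--     for msg in msgs:
--         if msg.startswith("Assistant:") or msg.startswith("Human:"):
--             if current_group and current_group[0].split(": ")[0] != msg.split(": ")[0]:
--                 organized_msgs.append(" ".join(current_group))
--                 current_group = []
--         current_group.append(msg)
--
--     if current_group:
--         organized_msgs.append(" ".join(current_group))
--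
--     return organized_msgs
-- ===== SOURCE B (Python) =====
-- def organize_messages(msgs):
--     """Organize messages by splitting and grouping based on roles - Assistant vs Human."""
--     out = []
--     i = 0
--     n = len(msgs)
--     while i < n:
--         key = msgs[i].split(": ")[0]
--         j = i + 1
--         while j < n and not ((msgs[j].startswith("Assistant:") or msgs[j].startswith("Human:"))
--                              and msgs[j].split(": ")[0] != key):
--             j += 1
--         out.append(" ".join(msgs[i:j]))
--         i = j
--     return out
-- ===== Notes on version B (the rewrite author's own statement) =====
-- stated objective: alternative
-- what changed: Replaces A's single-pass accumulator (organized_msgs/current_group with flush-on-role-change) by an outer loop that repeatedly peels the maximal run sharing the first message's split-key via an inner index scan and joins each run slice directly.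
import Mathlib
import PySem

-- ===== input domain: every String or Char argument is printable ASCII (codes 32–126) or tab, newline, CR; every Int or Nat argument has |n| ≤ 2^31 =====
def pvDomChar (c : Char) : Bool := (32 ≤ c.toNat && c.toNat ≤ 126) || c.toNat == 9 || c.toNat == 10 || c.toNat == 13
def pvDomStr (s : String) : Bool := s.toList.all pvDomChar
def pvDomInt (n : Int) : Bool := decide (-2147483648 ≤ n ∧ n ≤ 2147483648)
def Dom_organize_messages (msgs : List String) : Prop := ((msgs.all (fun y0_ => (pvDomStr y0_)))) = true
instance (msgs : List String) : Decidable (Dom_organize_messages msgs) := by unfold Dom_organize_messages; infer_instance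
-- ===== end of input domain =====

-- B peels maximal same-key runs with an inner scan instead of A's flush-on-change accumulator; return value only, no speed claim.

-- ===== PORT A =====
-- msg.split(": ")[0]; split with a nonempty separator always returns a nonempty list, so [0] is total
def pvKey (m : String) : String :=
  match PySem.Str.split? m ": " with
  | some (k :: _) => k
  | _ => ""

-- msg.startswith("Assistant:") or msg.startswith("Human:")
def pvPrefixed (m : String) : Bool :=
  PySem.Str.startswith m "Assistant:" || PySem.Str.startswith m "Human:"

-- one iteration of A's for-loop over state (organized_msgs, current_group)
def aStep (st : List String × List String) (m : String) : List String × List String :=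
  if pvPrefixed m && (decide (st.2 ≠ []) && decide (pvKey (st.2.headD "") ≠ pvKey m)) then
    (st.1 ++ [PySem.Str.join " " st.2], [m])
  else
    (st.1, st.2 ++ [m])

def organize_messages (msgs : List String) : List String :=
  let st := msgs.foldl aStep ([], [])
  if st.2 ≠ [] then st.1 ++ [PySem.Str.join " " st.2] else st.1

-- ===== PORT B =====
-- B's inner while loop: splits off the longest prefix containing no prefixed message whose key differs from `key`
def altRun (key : String) : List String → List String × List String
  | [] => ([], [])
  | m :: rest =>
    if pvPrefixed m && decide (pvKey m ≠ key) then
      ([], m :: rest)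
    else
      let p := altRun key rest
      (m :: p.1, p.2)

theorem altRun_snd_length (key : String) (l : List String) :
    (altRun key l).2.length ≤ l.length := by
  induction l with
  | nil => simp [altRun]
  | cons m rest ih =>
    simp only [altRun]
    split
    · simp
    · simpa using Nat.le_succ_of_le ih

-- B's outer while loop: emit the joined run, continue from its end
def organize_messages_alt : List String → List String
  | [] => []
  | m :: rest =>
    let p := altRun (pvKey m) rest
    PySem.Str.join " " (m :: p.1) :: organize_messages_alt p.2
termination_by l => l.length
decreasing_by exact Nat.lt_succ_of_le (altRun_snd_length (pvKey m) rest)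

-- ===== PRECONDITION & SPEC =====
def Spec_organize_messages (msgs : List String) (out : List String) : Prop := out = organize_messages_alt msgs
instance (msgs : List String) (out : List String) : Decidable (Spec_organize_messages msgs out) := by unfold Spec_organize_messages; infer_instance

-- ===== CLAIM (what is proved, stated in full; the proofs are below) =====
def Claim_equal_organize_messages : Prop := ∀ (msgs : List String), Dom_organize_messages msgs → Spec_organize_messages msgs (organize_messages msgs)

-- ===== LEMMAS AND PROOFS =====

-- invariant of A's fold: with a nonempty current group c :: cs, finishing the fold yields the
-- already-flushed groups, then the current group extended by the run matching its head's key,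
-- then B's groups of the remainder
theorem fold_invariant (l : List String) :
    ∀ (org : List String) (c : String) (cs : List String),
      (let st := l.foldl aStep (org, c :: cs)
       if st.2 ≠ [] then st.1 ++ [PySem.Str.join " " st.2] else st.1) =
      org ++ PySem.Str.join " " (c :: cs ++ (altRun (pvKey c) l).1) ::
        organize_messages_alt (altRun (pvKey c) l).2 := by
  induction l with
  | nil =>
    intro org c cs
    simp [altRun, organize_messages_alt]
  | cons m rest ih =>
    intro org c cs
    simp only [List.foldl_cons]
    by_cases hp : pvPrefixed m = true
    · by_cases hk : pvKey m = pvKey c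
      · -- same key: m joins the current group
        have hstep : aStep (org, c :: cs) m = (org, c :: (cs ++ [m])) := by
          simp [aStep, hk]
        rw [hstep, ih org c (cs ++ [m])]
        simp [altRun, hp, hk]
      · -- different key: flush, start a new group with m
        have hne : ¬ pvKey c = pvKey m := fun e => hk e.symm
        have hstep : aStep (org, c :: cs) m =
            (org ++ [PySem.Str.join " " (c :: cs)], [m]) := by
          simp [aStep, hp, hne]
        rw [hstep, ih (org ++ [PySem.Str.join " " (c :: cs)]) m []]
        simp [altRun, hp, hk, organize_messages_alt]
    · -- not prefixed: m joins the current group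
      have hstep : aStep (org, c :: cs) m = (org, c :: (cs ++ [m])) := by
        simp [aStep, hp]
      rw [hstep, ih org c (cs ++ [m])]
      simp [altRun, hp]

-- ===== VERDICT (by name: the statement is the Claim_ definition above) =====
theorem organize_messages_spec : Claim_equal_organize_messages := by
  intro msgs _
  unfold Spec_organize_messages
  cases msgs with
  | nil => simp [organize_messages, organize_messages_alt]
  | cons m rest =>
    unfold organize_messages
    simp only [List.foldl_cons]
    have hstep : aStep ([], []) m = ([], m :: []) := by simp [aStep]
    rw [hstep]
    have h := fold_invariant rest [] m []
    simp only at h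
    rw [h]
    simp [organize_messages_alt]
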